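-- pv_equiv track=rewrite | github.com/Dee66/VectorScan | tools/vectorscan/plan_evolution.py | _classify_actions
-- ===== SOURCE A (Python) =====
-- from typing import Any, Dict, Iterable, List, Optional, Sequence, Tuple
--
-- def _classify_actions(actions: Sequence[Any]) -> Optional[str]:
--     normalized = [str(action).lower() for action in actions if isinstance(action, str) and action]
--     if not normalized:
--         return None
--     if "update" in normalized:
--         return "changes"
--     if "create" in normalized and "delete" in normalized:
--         return "changes"
--     if "create" in normalized:
--         return "adds"
--     if "delete" in normalized:
--         return "destroys"
--     return None
-- ===== SOURCE B (Python) =====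
-- _TABLE = [None, "destroys", "adds", "changes", "changes", "changes", "changes", "changes"]
-- _CODE = {"update": 4, "create": 2, "delete": 1}
--
-- def _classify_actions(actions):
--     seen = False
--     mask = 0
--     for a in actions:
--         if isinstance(a, str) and a:
--             seen = True
--             mask |= _CODE.get(a.lower(), 0)
--     return _TABLE[mask] if seen else None
-- ===== Notes on version B (the rewrite author's own statement) =====
-- stated objective: alternative
-- what changed: Replaces the normalized list plus four membership scans and a branch cascade with a single pass OR-ing keyword bit codes (update=4, create=2, delete=1) into a 3-bit mask, then a direct lookup in an 8-entry result table — no branches decide the category.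
import Mathlib
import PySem

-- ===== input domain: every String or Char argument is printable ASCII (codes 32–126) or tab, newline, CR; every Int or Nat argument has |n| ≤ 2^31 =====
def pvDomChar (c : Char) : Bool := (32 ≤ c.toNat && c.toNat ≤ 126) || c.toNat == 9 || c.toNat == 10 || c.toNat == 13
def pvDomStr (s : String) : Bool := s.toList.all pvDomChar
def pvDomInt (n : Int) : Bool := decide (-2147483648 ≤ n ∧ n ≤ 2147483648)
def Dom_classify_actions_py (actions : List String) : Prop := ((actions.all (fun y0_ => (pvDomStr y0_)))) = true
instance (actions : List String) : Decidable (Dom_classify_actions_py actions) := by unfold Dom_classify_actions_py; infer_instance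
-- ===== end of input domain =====

-- B replaces A's normalized list + repeated membership scans + branch cascade by a single
-- pass OR-ing per-keyword bit codes into a 3-bit mask, resolved by an 8-entry lookup table.

-- ===== PORT A =====
def classify_actions_py (actions : List String) : Option String :=
  let normalized := (actions.filter (fun a => decide (a ≠ ""))).map PySem.Str.lower
  if normalized = [] then none
  else if normalized.contains "update" then some "changes"
  else if normalized.contains "create" && normalized.contains "delete" then some "changes"
  else if normalized.contains "create" then some "adds"
  else if normalized.contains "delete" then some "destroys"
  else none

-- ===== PORT B =====
-- _CODE.get(s, 0): keyword → bit code
def pvCode (s : String) : Nat :=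
  if s = "update" then 4 else if s = "create" then 2 else if s = "delete" then 1 else 0

-- _TABLE
def pvTable : List (Option String) :=
  [none, some "destroys", some "adds", some "changes", some "changes", some "changes", some "changes", some "changes"]

def classify_actions_py_alt (actions : List String) : Option String :=
  let st := actions.foldl
    (fun st a => if a ≠ "" then (true, st.2 ||| pvCode (PySem.Str.lower a)) else st)
    (false, 0)
  -- _TABLE[mask]: the mask is always < 8 (OR of codes 0,1,2,4), so plain indexing is exact
  if st.1 then pvTable.getD st.2 none else none

-- ===== PRECONDITION & SPEC =====
def Spec_classify_actions_py (actions : List String) (out : Option String) : Prop := out = classify_actions_py_alt actions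
instance (actions : List String) (out : Option String) : Decidable (Spec_classify_actions_py actions out) := by unfold Spec_classify_actions_py; infer_instance

-- ===== CLAIM (what is proved, stated in full; the proofs are below) =====
def Claim_equal_classify_actions_py : Prop := ∀ (actions : List String), Dom_classify_actions_py actions → Spec_classify_actions_py actions (classify_actions_py actions)

-- ===== LEMMAS AND PROOFS =====

def pvNorm (actions : List String) : List String :=
  (actions.filter (fun a => decide (a ≠ ""))).map PySem.Str.lower

def pvMaskOf : List String → Nat
  | [] => 0
  | x :: r => pvCode x ||| pvMaskOf r

lemma pv_fold (actions : List String) (b : Bool) (m : Nat) :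
    actions.foldl
      (fun st a => if a ≠ "" then (true, st.2 ||| pvCode (PySem.Str.lower a)) else st)
      (b, m)
    = (b || !decide (pvNorm actions = []), m ||| pvMaskOf (pvNorm actions)) := by
  induction actions generalizing b m with
  | nil => simp [pvNorm, pvMaskOf]
  | cons a rest ih =>
    by_cases ha : a = ""
    · subst ha
      rw [List.foldl_cons, if_neg (by simp), ih]
      have h0 : pvNorm ("" :: rest) = pvNorm rest := by simp [pvNorm]
      rw [h0]
    · have hnorm : pvNorm (a :: rest) = PySem.Str.lower a :: pvNorm rest := by
        simp [pvNorm, ha]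
      rw [List.foldl_cons, if_pos (by simpa using ha), ih, hnorm]
      simp only [pvMaskOf]
      simp [Nat.lor_assoc]

lemma pv_mask_eq (l : List String) : pvMaskOf l =
    (if "update" ∈ l then 4 else 0) |||
    (if "create" ∈ l then 2 else 0) |||
    (if "delete" ∈ l then 1 else 0) := by
  induction l with
  | nil => simp [pvMaskOf]
  | cons x r ih =>
    rw [show pvMaskOf (x :: r) = pvCode x ||| pvMaskOf r from rfl, ih]
    by_cases hu : "update" ∈ r <;> by_cases hc : "create" ∈ r <;> by_cases hd : "delete" ∈ r <;>
      by_cases h1 : x = "update" <;> by_cases h2 : x = "create" <;> by_cases h3 : x = "delete" <;>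
      simp [pvCode, h1, h2, h3, List.mem_cons, hu, hc, hd, eq_comm]

-- ===== VERDICT (by name: the statement is the Claim_ definition above) =====
theorem classify_actions_py_spec : Claim_equal_classify_actions_py := by
  intro actions _
  unfold Spec_classify_actions_py classify_actions_py classify_actions_py_alt
  rw [pv_fold, pv_mask_eq]
  have hfold : (actions.filter (fun a => decide (a ≠ ""))).map PySem.Str.lower = pvNorm actions := rfl
  rw [hfold]
  by_cases h : pvNorm actions = []
  · simp [h]
  · by_cases hu : "update" ∈ pvNorm actions <;> by_cases hc : "create" ∈ pvNorm actions <;>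
      by_cases hd : "delete" ∈ pvNorm actions <;>
      simp [h, hu, hc, hd, pvTable]
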